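-- pv_equiv track=rewrite | github.com/Lucasbarbsz/-nicioestudos.py | projeto.dominó.py | escolher_inicial
-- ===== SOURCE A (Python) =====
-- def soma_peca(peca):
--     return peca[0] + peca[1]
--
-- def escolher_inicial(mao1, mao2):
--     todas = [(p, 'p1') for p in mao1] + [(p, 'p2') for p in mao2]
--     # prioridade: maior duplo
--     duplos = [(p, who) for p, who in todas if p[0] == p[1]]
--     if duplos:
--         duplos.sort(key=lambda x: (x[0][0], x[0][1]), reverse=True)
--         return duplos[0]  # (peca, 'p1'/'p2')
--     # senão maior soma
--     todas.sort(key=lambda x: soma_peca(x[0]), reverse=True)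
--     return todas[0]
-- ===== SOURCE B (Python) =====
-- def _chave(x):
--     p = x[0]
--     if p[0] == p[1]:
--         return (1, p[0])
--     return (0, p[0] + p[1])
--
-- def escolher_inicial(mao1, mao2):
--     # one linear pass with a composite priority key:
--     # doubles outrank non-doubles; doubles compare by pip value, others by pip sum;
--     # first maximal element wins (same tie-break as A's stable reverse sort).
--     todas = [(p, 'p1') for p in mao1] + [(p, 'p2') for p in mao2]
--     melhor = todas[0]
--     melhor_k = _chave(melhor)
--     for cand in todas[1:]:
--         k = _chave(cand)
--         if k > melhor_k:
--             melhor, melhor_k = cand, k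
--     return melhor
-- ===== Notes on version B (the rewrite author's own statement) =====
-- stated objective: faster
-- what changed: Replaced the filter-doubles + two stable reverse sorts with a single linear max-scan over all pieces using one composite priority key (is-double, double value / pip sum), keeping the first maximal element to reproduce the stable-sort tie-break.
import Mathlib
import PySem

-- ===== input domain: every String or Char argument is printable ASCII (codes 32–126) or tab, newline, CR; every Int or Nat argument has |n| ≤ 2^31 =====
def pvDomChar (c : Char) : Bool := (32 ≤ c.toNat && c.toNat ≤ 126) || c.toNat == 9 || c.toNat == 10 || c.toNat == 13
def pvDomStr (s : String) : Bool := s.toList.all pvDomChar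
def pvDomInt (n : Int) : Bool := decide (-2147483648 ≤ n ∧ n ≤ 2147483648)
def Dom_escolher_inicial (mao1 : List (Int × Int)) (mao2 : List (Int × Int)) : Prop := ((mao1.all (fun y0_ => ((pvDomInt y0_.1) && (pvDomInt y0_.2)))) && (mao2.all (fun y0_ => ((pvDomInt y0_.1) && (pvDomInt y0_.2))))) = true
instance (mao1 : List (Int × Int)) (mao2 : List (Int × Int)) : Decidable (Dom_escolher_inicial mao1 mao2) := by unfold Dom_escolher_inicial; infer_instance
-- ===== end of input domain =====

-- B replaces A's filter-doubles + two stable reverse sorts by one linear max-scan with a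
-- composite priority key, keeping the first maximal element (A's stable-sort tie-break).

-- ===== PORT A =====
def escolher_inicial (mao1 : List (Int × Int)) (mao2 : List (Int × Int)) : (Int × Int) × String :=
  let todas := mao1.map (fun p => (p, "p1")) ++ mao2.map (fun p => (p, "p2"))
  let duplos := todas.filter (fun x => x.1.1 == x.1.2)
  if duplos.isEmpty = false then
    -- duplos.sort(key=lambda x: (x[0][0], x[0][1]), reverse=True); duplos[0]
    PySem.List.pyGetD (PySem.List.sorted2 duplos (fun x => x.1.1) (fun x => x.1.2) true) 0 ((0, 0), "")
  else
    -- todas.sort(key=lambda x: soma_peca(x[0]), reverse=True); todas[0] (IndexError on empty: Pre_)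
    PySem.List.pyGetD (PySem.List.sorted todas (fun x => x.1.1 + x.1.2) true) 0 ((0, 0), "")

-- ===== PORT B =====
def pvChave (x : (Int × Int) × String) : Int × Int :=
  if x.1.1 = x.1.2 then (1, x.1.1) else (0, x.1.1 + x.1.2)

-- Python's '>' on the int pairs _chave returns (lexicographic)
def pvLexGt (k m : Int × Int) : Bool :=
  decide (m.1 < k.1) || (decide (k.1 = m.1) && decide (m.2 < k.2))

def escolher_inicial_alt (mao1 : List (Int × Int)) (mao2 : List (Int × Int)) : (Int × Int) × String :=
  let todas := mao1.map (fun p => (p, "p1")) ++ mao2.map (fun p => (p, "p2"))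
  match todas with
  | [] => ((0, 0), "")   -- todas[0]: IndexError in Python, excluded by Pre_
  | t0 :: rest =>
    (rest.foldl (fun s c => if pvLexGt (pvChave c) s.2 then (c, pvChave c) else s)
      (t0, pvChave t0)).1

-- ===== PRECONDITION & SPEC =====
-- Pre_ excludes exactly the two empty hands, where A (and B) raise IndexError on todas[0].
def Pre_escolher_inicial (mao1 : List (Int × Int)) (mao2 : List (Int × Int)) : Prop :=
  mao1 ≠ [] ∨ mao2 ≠ []
instance (mao1 : List (Int × Int)) (mao2 : List (Int × Int)) : Decidable (Pre_escolher_inicial mao1 mao2) := by unfold Pre_escolher_inicial; infer_instance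

def pvWitness_escolher_inicial : (List (Int × Int)) × (List (Int × Int)) := ([(1, 2), (3, 3)], [(5, 5)])

def Spec_escolher_inicial (mao1 : List (Int × Int)) (mao2 : List (Int × Int)) (out : (Int × Int) × String) : Prop := out = escolher_inicial_alt mao1 mao2
instance (mao1 : List (Int × Int)) (mao2 : List (Int × Int)) (out : (Int × Int) × String) : Decidable (Spec_escolher_inicial mao1 mao2 out) := by unfold Spec_escolher_inicial; infer_instance

-- ===== CLAIM (what is proved, stated in full; the proofs are below) =====
def Claim_equal_escolher_inicial : Prop := ∀ (mao1 : List (Int × Int)) (mao2 : List (Int × Int)), Dom_escolher_inicial mao1 mao2 → Pre_escolher_inicial mao1 mao2 → Spec_escolher_inicial mao1 mao2 (escolher_inicial mao1 mao2)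

-- ===== LEMMAS AND PROOFS =====

-- is-double test, and the three "keep first maximum" step functions the two programs reduce to
def pvIsD (x : (Int × Int) × String) : Bool := x.1.1 == x.1.2

def pvSelB (m c : (Int × Int) × String) : (Int × Int) × String :=
  if pvLexGt (pvChave c) (pvChave m) then c else m

def pvSelA1 (m c : (Int × Int) × String) : (Int × Int) × String :=
  if (decide (m.1.1 < c.1.1) || (!decide (c.1.1 < m.1.1) && decide (m.1.2 < c.1.2))) then c else m

def pvSelA2 (m c : (Int × Int) × String) : (Int × Int) × String :=
  if decide (m.1.1 + m.1.2 < c.1.1 + c.1.2) then c else m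

-- the head of a foldl of insertBy is the "keep first preferred" running fold
theorem pv_head_foldl_insertBy {α : Type} (before : α → α → Bool) :
    ∀ (xs : List α) (b : α) (bs : List α), ∃ t,
      xs.foldl (fun acc x => PySem.List.insertBy before x acc) (b :: bs)
        = (xs.foldl (fun m x => if before x m then x else m) b) :: t := by
  intro xs
  induction xs with
  | nil => intro b bs; exact ⟨bs, rfl⟩
  | cons x xs ih =>
    intro b bs
    by_cases h : before x b = true
    · have : PySem.List.insertBy before x (b :: bs) = x :: b :: bs := by
        simp [PySem.List.insertBy, h]
      simpa [List.foldl_cons, this, h] using ih x (b :: bs)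
    · have hb : before x b = false := by simpa using h
      have : PySem.List.insertBy before x (b :: bs) = b :: PySem.List.insertBy before x bs := by
        simp [PySem.List.insertBy, hb]
      simpa [List.foldl_cons, this, hb] using ih b (PySem.List.insertBy before x bs)

-- A's first branch: head of sorted2(..., reverse=True) as a running fold
theorem pv_sorted2_head (x0 : (Int × Int) × String) (rest : List ((Int × Int) × String)) :
    PySem.List.pyGetD (PySem.List.sorted2 (x0 :: rest) (fun x => x.1.1) (fun x => x.1.2) true) 0 ((0, 0), "")
      = rest.foldl pvSelA1 x0 := by
  obtain ⟨t, ht⟩ := pv_head_foldl_insertBy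
    (fun c m : (Int × Int) × String => (decide (m.1.1 < c.1.1) || (!decide (c.1.1 < m.1.1) && decide (m.1.2 < c.1.2))))
    rest x0 []
  have h2 : PySem.List.sorted2 (x0 :: rest) (fun x => x.1.1) (fun x => x.1.2) true
      = rest.foldl (fun acc x => PySem.List.insertBy
          (fun c m : (Int × Int) × String => (decide (m.1.1 < c.1.1) || (!decide (c.1.1 < m.1.1) && decide (m.1.2 < c.1.2)))) x acc)
          (x0 :: []) := by
    simp [PySem.List.sorted2, PySem.List.insertBy]
  rw [h2, ht, PySem.List.pyGetD_zero]
  simp only [List.getD_cons_zero]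
  rfl

-- A's second branch: head of sorted(..., reverse=True) as a running fold
theorem pv_sorted_head (x0 : (Int × Int) × String) (rest : List ((Int × Int) × String)) :
    PySem.List.pyGetD (PySem.List.sorted (x0 :: rest) (fun x => x.1.1 + x.1.2) true) 0 ((0, 0), "")
      = rest.foldl pvSelA2 x0 := by
  obtain ⟨t, ht⟩ := pv_head_foldl_insertBy
    (fun c m : (Int × Int) × String => decide (m.1.1 + m.1.2 < c.1.1 + c.1.2)) rest x0 []
  have h2 : PySem.List.sorted (x0 :: rest) (fun x => x.1.1 + x.1.2) true
      = rest.foldl (fun acc x => PySem.List.insertBy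
          (fun c m : (Int × Int) × String => decide (m.1.1 + m.1.2 < c.1.1 + c.1.2)) x acc) (x0 :: []) := by
    simp [PySem.List.sorted, PySem.List.insertBy]
  rw [h2, ht, PySem.List.pyGetD_zero]
  simp only [List.getD_cons_zero]
  rfl

-- B's state invariant: the carried key is always the key of the carried best
theorem pv_foldl_pair (l : List ((Int × Int) × String)) :
    ∀ m, l.foldl (fun s c => if pvLexGt (pvChave c) s.2 then (c, pvChave c) else s) (m, pvChave m)
      = (l.foldl pvSelB m, pvChave (l.foldl pvSelB m)) := by
  induction l with
  | nil => intro m; rfl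
  | cons c l ih =>
    intro m
    by_cases h : pvLexGt (pvChave c) (pvChave m) = true
    · simp [List.foldl_cons, h, pvSelB, ih c]
    · simp [List.foldl_cons, h, pvSelB, ih m]

-- step agreements
theorem pv_selB_dd {m c : (Int × Int) × String} (hm : pvIsD m = true) (hc : pvIsD c = true) :
    pvSelB m c = pvSelA1 m c := by
  simp [pvIsD] at hm hc
  simp [pvSelB, pvSelA1, pvLexGt, pvChave, hm, hc]
  split_ifs <;> simp_all
  omega

theorem pv_selB_dn {m c : (Int × Int) × String} (hm : pvIsD m = true) (hc : pvIsD c = false) :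
    pvSelB m c = m := by
  simp [pvIsD] at hm hc
  simp [pvSelB, pvLexGt, pvChave, hm, hc]

theorem pv_selB_nd {m c : (Int × Int) × String} (hm : pvIsD m = false) (hc : pvIsD c = true) :
    pvSelB m c = c := by
  simp [pvIsD] at hm hc
  simp [pvSelB, pvLexGt, pvChave, hm, hc]

theorem pv_selB_nn {m c : (Int × Int) × String} (hm : pvIsD m = false) (hc : pvIsD c = false) :
    pvSelB m c = pvSelA2 m c := by
  simp [pvIsD] at hm hc
  simp [pvSelB, pvSelA2, pvLexGt, pvChave, hm, hc]

theorem pv_selA1_isD {m c : (Int × Int) × String} (hm : pvIsD m = true) (hc : pvIsD c = true) :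
    pvIsD (pvSelA1 m c) = true := by
  unfold pvSelA1; split_ifs
  · exact hc
  · exact hm

theorem pv_selA2_isD {m c : (Int × Int) × String} (hm : pvIsD m = false) (hc : pvIsD c = false) :
    pvIsD (pvSelA2 m c) = false := by
  unfold pvSelA2; split_ifs
  · exact hc
  · exact hm

-- the central lemma: B's single scan computes A's two-phase selection
theorem pv_main : ∀ (l : List ((Int × Int) × String)) (m : (Int × Int) × String),
    (pvIsD m = true → l.foldl pvSelB m = (l.filter pvIsD).foldl pvSelA1 m) ∧
    (pvIsD m = false → l.filter pvIsD = [] → l.foldl pvSelB m = l.foldl pvSelA2 m) ∧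
    (pvIsD m = false → ∀ d ds, l.filter pvIsD = d :: ds → l.foldl pvSelB m = ds.foldl pvSelA1 d) := by
  intro l
  induction l with
  | nil =>
    intro m
    refine ⟨fun _ => rfl, fun _ _ => rfl, fun _ d ds h => by simp at h⟩
  | cons c t ih =>
    intro m
    refine ⟨?_, ?_, ?_⟩
    · intro hm
      by_cases hc : pvIsD c = true
      · have hstep := pv_selB_dd hm hc
        have := (ih (pvSelA1 m c)).1 (pv_selA1_isD hm hc)
        simp [List.foldl_cons, hc, hstep, this]
      · have hc' : pvIsD c = false := by simpa using hc
        have hstep := pv_selB_dn hm hc'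
        have := (ih m).1 hm
        simp [List.foldl_cons, hc', hstep, this]
    · intro hm hfil
      rw [List.filter_cons] at hfil
      by_cases hc : pvIsD c = true
      · rw [if_pos hc] at hfil
        exact absurd hfil (by simp)
      · have hc' : pvIsD c = false := by simpa using hc
        rw [if_neg (by simp [hc'])] at hfil
        have hstep := pv_selB_nn hm hc'
        have := ((ih (pvSelA2 m c)).2.1) (pv_selA2_isD hm hc') hfil
        rw [List.foldl_cons, hstep, this]
        rfl
    · intro hm d ds hfil
      rw [List.filter_cons] at hfil
      by_cases hc : pvIsD c = true
      · rw [if_pos hc] at hfil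
        injection hfil with hd0 hds
        have hstep := pv_selB_nd hm hc
        have := (ih c).1 hc
        rw [List.foldl_cons, hstep, this, hds, hd0]
      · have hc' : pvIsD c = false := by simpa using hc
        rw [if_neg (by simp [hc'])] at hfil
        have hstep := pv_selB_nn hm hc'
        have := ((ih (pvSelA2 m c)).2.2) (pv_selA2_isD hm hc') d ds hfil
        rw [List.foldl_cons, hstep, this]

-- ===== VERDICT (by name: the statement is the Claim_ definition above) =====
theorem escolher_inicial_spec : Claim_equal_escolher_inicial := by
  intro mao1 mao2 _ hpre
  have htodas : mao1.map (fun p => (p, "p1")) ++ mao2.map (fun p => (p, "p2")) ≠ [] := by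
    rcases hpre with h | h <;> cases mao1 <;> cases mao2 <;> simp_all
  obtain ⟨t0, rest, hcons⟩ := List.exists_cons_of_ne_nil htodas
  show escolher_inicial mao1 mao2 = escolher_inicial_alt mao1 mao2
  simp only [escolher_inicial, escolher_inicial_alt, hcons]
  rw [pv_foldl_pair]
  by_cases hd : (t0 :: rest).filter (fun x => x.1.1 == x.1.2) = []
  · rw [if_neg (by simp [hd]), pv_sorted_head]
    have hfil : (t0 :: rest).filter pvIsD = [] := hd
    rw [List.filter_cons] at hfil
    by_cases ht0 : pvIsD t0 = true
    · rw [if_pos ht0] at hfil; exact absurd hfil (by simp)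
    · have ht0' : pvIsD t0 = false := by simpa using ht0
      rw [if_neg (by simp [ht0'])] at hfil
      exact ((pv_main rest t0).2.1 ht0' hfil).symm
  · obtain ⟨d, ds, hfil⟩ := List.exists_cons_of_ne_nil hd
    rw [if_pos (by simp [hfil]), hfil, pv_sorted2_head]
    have hfil' : (t0 :: rest).filter pvIsD = d :: ds := hfil
    rw [List.filter_cons] at hfil'
    by_cases ht0 : pvIsD t0 = true
    · rw [if_pos ht0] at hfil'
      injection hfil' with hd0 hds
      rw [← hd0, ← hds]
      exact ((pv_main rest t0).1 ht0).symm
    · have ht0' : pvIsD t0 = false := by simpa using ht0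
      rw [if_neg (by simp [ht0'])] at hfil'
      exact ((pv_main rest t0).2.2 ht0' d ds hfil').symm
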